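-- pv_equiv track=rewrite | github.com/GizawAAiT/Codeforces | B_File_Name.py | solve
-- ===== SOURCE A (Python) =====
-- def solve(name: str):
--     running = count = 0
--     for char in name:
--         if char == 'x':
--             running += 1
--
--         else:
--             running = 0
--
--         count += running > 2
--
--     return count
-- ===== SOURCE B (Python) =====
-- from itertools import groupby
--
-- def solve(name: str):
--     total = 0
--     for key, group in groupby(name):
--         if key == 'x':
--             total += max(0, sum(1 for _ in group) - 2)
--     return total
-- ===== Notes on version B (the rewrite author's own statement) =====
-- stated objective: alternative
-- what changed: Replaces the incremental running-counter pass with itertools.groupby run decomposition: each maximal run of 'x' of length L contributes max(0, L-2) to the total.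
import Mathlib
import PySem

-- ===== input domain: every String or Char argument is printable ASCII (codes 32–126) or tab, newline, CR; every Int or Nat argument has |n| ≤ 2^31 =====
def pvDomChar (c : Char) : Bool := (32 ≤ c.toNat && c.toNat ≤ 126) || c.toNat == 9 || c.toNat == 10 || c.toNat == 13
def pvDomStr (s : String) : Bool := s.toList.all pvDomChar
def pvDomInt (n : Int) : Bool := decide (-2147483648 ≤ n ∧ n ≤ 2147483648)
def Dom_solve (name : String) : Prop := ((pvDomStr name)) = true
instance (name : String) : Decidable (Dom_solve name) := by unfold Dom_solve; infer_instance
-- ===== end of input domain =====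

-- B counts per maximal-run contributions max(0,L-2) instead of A's incremental running counter; alternative decomposition, same cost.

-- ===== PORT A =====
-- running/count pair threaded through a left fold over the characters, as in A's loop
def solve (name : String) : Int :=
  (name.toList.foldl
    (fun (st : Int × Int) ch =>
      let running : Int := if ch = 'x' then st.1 + 1 else 0
      (running, st.2 + (if running > 2 then (1 : Int) else 0)))
    (0, 0)).2

-- ===== PORT B =====
-- grouping into maximal runs (itertools.groupby): each 'x'-run of length k contributes max 0 (k-2)
def solveRuns : List Char → Int
  | [] => 0
  | c :: t =>
    let k : Int := 1 + (t.takeWhile (· == c)).length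
    (if c = 'x' then max 0 (k - 2) else 0) + solveRuns (t.dropWhile (· == c))
termination_by l => l.length
decreasing_by
  simp only [List.length_cons]
  exact Nat.lt_succ_of_le (List.length_dropWhile_le _ _)

def solve_alt (name : String) : Int := solveRuns name.toList

-- ===== PRECONDITION & SPEC =====
def Spec_solve (name : String) (out : Int) : Prop := out = solve_alt name
instance (name : String) (out : Int) : Decidable (Spec_solve name out) := by unfold Spec_solve; infer_instance

-- ===== CLAIM (what is proved, stated in full; the proofs are below) =====
def Claim_equal_solve : Prop := ∀ (name : String), Dom_solve name → Spec_solve name (solve name)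

-- ===== LEMMAS AND PROOFS =====

-- A's loop as a structural recursion on the character list (running counter as parameter)
def G : List Char → Int → Int
  | [], _ => 0
  | ch :: t, r =>
    if ch = 'x' then (if r + 1 > 2 then (1 : Int) else 0) + G t (r + 1) else G t 0

theorem foldl_eq_G (l : List Char) : ∀ (r c : Int),
    (l.foldl
      (fun (st : Int × Int) ch =>
        let running : Int := if ch = 'x' then st.1 + 1 else 0
        (running, st.2 + (if running > 2 then (1 : Int) else 0)))
      (r, c)).2 = c + G l r := by
  induction l with
  | nil => intro r c; simp [G]
  | cons ch t ih =>
    intro r c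
    by_cases h : ch = 'x'
    · simp [G, h, List.foldl, ih]; ring
    · simp [G, h, List.foldl, ih]

-- consuming a run of x's: contribution is max 0 (r+len-2) - max 0 (r-2)
theorem G_xrun (xs : List Char) (hxs : ∀ a ∈ xs, a = 'x') (rest : List Char) :
    ∀ r : Int, 0 ≤ r →
      G (xs ++ rest) r = (max 0 (r + xs.length - 2) - max 0 (r - 2)) + G rest (r + xs.length) := by
  induction xs with
  | nil => intro r _; simp
  | cons a t ih =>
    intro r hr
    have ha : a = 'x' := hxs a (by simp)
    have ht : ∀ b ∈ t, b = 'x' := fun b hb => hxs b (by simp [hb])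
    have := ih ht (r + 1) (by omega)
    simp only [List.cons_append, G, ha, this, List.length_cons]
    have harith : (if r + 1 > 2 then (1 : Int) else 0)
        + ((max 0 (r + 1 + t.length - 2) - max 0 (r + 1 - 2))) =
        (max 0 (r + (t.length + 1) - 2) - max 0 (r - 2)) := by
      split_ifs <;> omega
    push_cast
    push_cast at harith
    rw [show r + (↑t.length + 1) - 2 = r + 1 + ↑t.length - 2 from by ring,
        show r + (↑t.length + 1) = r + 1 + ↑t.length from by ring]
    rw [show r + (↑t.length + 1) - 2 = r + 1 + ↑t.length - 2 from by ring] at harith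
    linarith [harith]

-- a non-'x' run contributes nothing and resets the counter to 0
theorem G_nonxrun (xs : List Char) (hxs : ∀ a ∈ xs, a ≠ 'x') (rest : List Char) :
    G (xs ++ rest) 0 = G rest 0 := by
  induction xs with
  | nil => simp
  | cons a t ih =>
    have ha : a ≠ 'x' := hxs a (by simp)
    have ht : ∀ b ∈ t, b ≠ 'x' := fun b hb => hxs b (by simp [hb])
    simp [G, ha, ih ht]

-- after a maximal run the next character differs, so the running counter is irrelevant
theorem G_reset (rest : List Char) (h : ∀ d, rest.head? = some d → d ≠ 'x') :
    ∀ r : Int, G rest r = G rest 0 := by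
  cases rest with
  | nil => intro r; rfl
  | cons d t =>
    intro r
    have hd : d ≠ 'x' := h d rfl
    simp [G, hd]

theorem G_eq_solveRuns : (l : List Char) → G l 0 = solveRuns l
  | [] => by simp [G, solveRuns]
  | c :: t => by
    have hsplit : t.takeWhile (· == c) ++ t.dropWhile (· == c) = t :=
      List.takeWhile_append_dropWhile
    have ihrest := G_eq_solveRuns (t.dropWhile (· == c))
    have hreset : ∀ d, (t.dropWhile (· == c)).head? = some d → d ≠ c := by
      intro d hd
      have := List.head?_dropWhile_not (p := (· == c)) (l := t)
      rw [hd] at this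
      simpa using this
    by_cases hc : c = 'x'
    · subst hc
      have htake : ∀ a ∈ t.takeWhile (· == 'x'), a = 'x' := by
        intro a ha
        have := List.mem_takeWhile_imp ha
        simpa using this
      have h2 := G_xrun (t.takeWhile (· == 'x')) htake (t.dropWhile (· == 'x')) 1 (by omega)
      rw [hsplit] at h2
      have h3 : G (t.dropWhile (· == 'x')) (1 + (t.takeWhile (· == 'x')).length) =
          G (t.dropWhile (· == 'x')) 0 :=
        G_reset _ hreset _
      have h1 : G ('x' :: t) 0 = G t 1 := by simp [G]
      rw [h1, h2, h3, ihrest]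
      rw [solveRuns]
      simp only [if_true]
      push_cast
      omega
    · have htake : ∀ a ∈ t.takeWhile (· == c), a ≠ 'x' := by
        intro a ha
        have := List.mem_takeWhile_imp ha
        simp only [beq_iff_eq] at this
        rw [this]; exact hc
      have h2 := G_nonxrun (t.takeWhile (· == c)) htake (t.dropWhile (· == c))
      rw [hsplit] at h2
      have h1 : G (c :: t) 0 = G t 0 := by simp [G, hc]
      rw [h1, h2, ihrest, solveRuns]
      simp [hc]
termination_by l => l.length
decreasing_by
  simp only [List.length_cons]
  exact Nat.lt_succ_of_le (List.length_dropWhile_le _ _)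

-- ===== VERDICT (by name: the statement is the Claim_ definition above) =====
theorem solve_spec : Claim_equal_solve := by
  intro name _
  unfold Spec_solve solve solve_alt
  rw [foldl_eq_G, G_eq_solveRuns]
  simp
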